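-- pv_equiv track=rewrite | github.com/issdandavis/scbe-aethermoore-demo | tests/test_horadam_transcript_vectors.py | horadam_sequence
-- ===== SOURCE A (Python) =====
-- def horadam_sequence(alpha: int, beta: int, n: int, mod: int = 2**64) -> int:
--     """
--     Compute nth term of Horadam sequence
--
--     H_0 = α
--     H_1 = β
--     H_n = H_{n-1} + H_{n-2} mod 2^64
--     """
--     if n == 0:
--         return alpha % mod
--     if n == 1:
--         return beta % mod
--
--     h_prev2 = alpha % mod
--     h_prev1 = beta % mod
--
--     for _ in range(2, n + 1):
--         h_curr = (h_prev1 + h_prev2) % mod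
--         h_prev2 = h_prev1
--         h_prev1 = h_curr
--
--     return h_prev1
-- ===== SOURCE B (Python) =====
-- def _fib_pair(k, mod):
--     # returns (F(k) % mod, F(k+1) % mod) by fast doubling
--     if k == 0:
--         return (0 % mod, 1 % mod)
--     a, b = _fib_pair(k >> 1, mod)
--     c = (a * (2 * b - a)) % mod
--     d = (a * a + b * b) % mod
--     if k & 1:
--         return (d, (c + d) % mod)
--     return (c, d)
--
--
-- def horadam_sequence(alpha: int, beta: int, n: int, mod: int = 2**64) -> int:
--     # H_n = F(n-1)*alpha + F(n)*beta; computed in O(log n) by fast doubling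
--     if n == 0:
--         return alpha % mod
--     if n <= 1:
--         return beta % mod
--     a, b = _fib_pair(n - 1, mod)
--     return (a * alpha + b * beta) % mod
-- ===== Notes on version B (the rewrite author's own statement) =====
-- stated objective: faster
-- what changed: Replaces A's O(n) linear iteration of the recurrence by the closed form H_n = F(n-1)*alpha + F(n)*beta with the Fibonacci pair (F(k), F(k+1)) computed by O(log n) fast doubling mod m.
import Mathlib
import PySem

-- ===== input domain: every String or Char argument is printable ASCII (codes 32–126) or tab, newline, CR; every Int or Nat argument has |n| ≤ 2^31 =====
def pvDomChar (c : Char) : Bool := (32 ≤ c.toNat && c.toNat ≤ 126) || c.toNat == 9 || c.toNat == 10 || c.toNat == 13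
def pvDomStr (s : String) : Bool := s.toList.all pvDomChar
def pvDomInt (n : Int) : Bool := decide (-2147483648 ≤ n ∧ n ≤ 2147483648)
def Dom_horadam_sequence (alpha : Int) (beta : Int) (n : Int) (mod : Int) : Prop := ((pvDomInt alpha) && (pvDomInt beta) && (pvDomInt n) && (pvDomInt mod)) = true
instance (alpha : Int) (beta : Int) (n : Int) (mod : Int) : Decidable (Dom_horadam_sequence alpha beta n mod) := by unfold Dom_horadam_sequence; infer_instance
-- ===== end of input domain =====

-- B replaces A's O(n) loop by fast doubling of the Fibonacci pair (O(log n)); return values proved equal whenever mod ≠ 0.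

-- ===== PORT A =====
def horadam_sequence (alpha : Int) (beta : Int) (n : Int) (mod : Int) : Int :=
  if n = 0 then PySem.Int.mod alpha mod
  else if n = 1 then PySem.Int.mod beta mod
  else
    -- state (h_prev2, h_prev1); for _ in range(2, n + 1)
    let r := (PySem.List.pyRange 2 (n + 1) 1).foldl
      (fun (p : Int × Int) _ => (p.2, PySem.Int.mod (p.2 + p.1) mod))
      (PySem.Int.mod alpha mod, PySem.Int.mod beta mod)
    r.2

-- ===== PORT B =====
-- _fib_pair(k, mod): returns (F(k) % mod, F(k+1) % mod) by fast doubling.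
-- Called only with k ≥ 0, so k is a Nat here; Python's k >> 1 is k / 2 and k & 1 is k % 2 on Nat (exact).
def fibPair (k : Nat) (m : Int) : Int × Int :=
  if hk : k = 0 then (PySem.Int.mod 0 m, PySem.Int.mod 1 m)
  else
    let p := fibPair (k / 2) m
    let c := PySem.Int.mod (p.1 * (2 * p.2 - p.1)) m
    let d := PySem.Int.mod (p.1 * p.1 + p.2 * p.2) m
    if k % 2 = 1 then (d, PySem.Int.mod (c + d) m) else (c, d)
termination_by k
decreasing_by exact Nat.div_lt_self (Nat.pos_of_ne_zero hk) (by norm_num)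

def horadam_sequence_alt (alpha : Int) (beta : Int) (n : Int) (mod : Int) : Int :=
  if n = 0 then PySem.Int.mod alpha mod
  else if n ≤ 1 then PySem.Int.mod beta mod
  else
    let p := fibPair (n - 1).toNat mod  -- n ≥ 2 in this branch, so .toNat is exact
    PySem.Int.mod (p.1 * alpha + p.2 * beta) mod

-- ===== PRECONDITION & SPEC =====
-- Pre_ excludes exactly mod = 0, where Python's % raises ZeroDivisionError (in A and in B alike).
def Pre_horadam_sequence (alpha : Int) (beta : Int) (n : Int) (mod : Int) : Prop := mod ≠ 0
instance (alpha : Int) (beta : Int) (n : Int) (mod : Int) : Decidable (Pre_horadam_sequence alpha beta n mod) := by unfold Pre_horadam_sequence; infer_instance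
def pvWitness_horadam_sequence : Int × Int × Int × Int := (3, 5, 10, 97)

def Spec_horadam_sequence (alpha : Int) (beta : Int) (n : Int) (mod : Int) (out : Int) : Prop := out = horadam_sequence_alt alpha beta n mod
instance (alpha : Int) (beta : Int) (n : Int) (mod : Int) (out : Int) : Decidable (Spec_horadam_sequence alpha beta n mod out) := by unfold Spec_horadam_sequence; infer_instance

-- ===== CLAIM (what is proved, stated in full; the proofs are below) =====
def Claim_equal_horadam_sequence : Prop := ∀ (alpha : Int) (beta : Int) (n : Int) (mod : Int), Dom_horadam_sequence alpha beta n mod → Pre_horadam_sequence alpha beta n mod → Spec_horadam_sequence alpha beta n mod (horadam_sequence alpha beta n mod)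

-- ===== LEMMAS AND PROOFS =====

-- Python's % leaves the residue class unchanged: (x % m) and x are congruent mod m.
theorem pymod_modeq (x m : Int) : Int.ModEq m (PySem.Int.mod x m) x := by
  have h := PySem.Int.floordiv_mul_add_mod x m
  have hx : PySem.Int.mod x m = x + m * (-(PySem.Int.floordiv x m)) := by linarith
  unfold Int.ModEq
  rw [hx, Int.add_mul_emod_self_left]

-- Congruent inputs give the same Python residue, for any nonzero modulus (of either sign).
theorem pymod_congr {m x y : Int} (hm : m ≠ 0) (h : Int.ModEq m x y) :
    PySem.Int.mod x m = PySem.Int.mod y m := by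
  rcases lt_or_gt_of_ne hm with hneg | hpos
  · have hx : PySem.Int.mod x m = -PySem.Int.mod (-x) (-m) := by
      have := PySem.Int.mod_neg_neg (-x) (-m); rw [neg_neg, neg_neg] at this; omega
    have hy : PySem.Int.mod y m = -PySem.Int.mod (-y) (-m) := by
      have := PySem.Int.mod_neg_neg (-y) (-m); rw [neg_neg, neg_neg] at this; omega
    have h' : Int.ModEq (-m) (-x) (-y) := by
      rw [Int.modEq_iff_dvd] at h ⊢
      rw [show -y - -x = -(y - x) by ring]
      exact neg_dvd.mpr (dvd_neg.mpr h)
    rw [hx, hy, PySem.Int.mod_eq_emod_of_pos (by omega), PySem.Int.mod_eq_emod_of_pos (by omega), h']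
  · rw [PySem.Int.mod_eq_emod_of_pos hpos, PySem.Int.mod_eq_emod_of_pos hpos]; exact h

-- the mathematical (unreduced) Horadam sequence
def hor (alpha beta : Int) : Nat → Int
  | 0 => alpha
  | 1 => beta
  | (k+2) => hor alpha beta (k+1) + hor alpha beta k

theorem hor_eq_fib (alpha beta : Int) (k : Nat) :
    hor alpha beta (k+1) = (Nat.fib k : Int) * alpha + (Nat.fib (k+1) : Int) * beta := by
  induction k using Nat.twoStepInduction with
  | zero => simp [hor, Nat.fib]
  | one =>
    show hor alpha beta 2 = _
    rw [show (2:Nat) = 0 + 2 by rfl, hor]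
    simp [hor, Nat.fib_add_two]; ring
  | more j ih1 ih2 =>
    show hor alpha beta (j+1+2) = _
    rw [hor, ih1, ih2, Nat.fib_add_two (n := j+1), Nat.fib_add_two (n := j)]
    push_cast; ring

theorem fib2m (h : Nat) :
    (Nat.fib (2*h) : Int) = (Nat.fib h : Int) * (2 * (Nat.fib (h+1) : Int) - (Nat.fib h : Int)) := by
  have h1 : Nat.fib h ≤ Nat.fib (h+1) := Nat.fib_mono (by omega)
  have hle : Nat.fib h ≤ 2 * Nat.fib (h+1) := by omega
  have := Nat.fib_two_mul h
  zify [hle] at this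
  linarith [this]

theorem fib2m1 (h : Nat) :
    (Nat.fib (2*h+1) : Int) = (Nat.fib h : Int) * (Nat.fib h : Int) + (Nat.fib (h+1) : Int) * (Nat.fib (h+1) : Int) := by
  have := Nat.fib_two_mul_add_one h
  zify at this
  rw [this]; ring

theorem fibPair_eq (m : Int) (hm : m ≠ 0) (k : Nat) :
    fibPair k m = (PySem.Int.mod (Nat.fib k : Int) m, PySem.Int.mod (Nat.fib (k+1) : Int) m) := by
  induction k using Nat.strong_induction_on with
  | _ k IH =>
    rcases Nat.eq_zero_or_pos k with hk0 | hkpos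
    · subst hk0; rw [fibPair]; simp [Nat.fib]
    · have hne : k ≠ 0 := Nat.pos_iff_ne_zero.mp hkpos
      rw [fibPair]; simp only [hne, dite_false]
      set h := k / 2 with hh
      have hIH := IH h (Nat.div_lt_self hkpos (by norm_num))
      have ma := pymod_modeq ((Nat.fib h : Int)) m
      have mb := pymod_modeq ((Nat.fib (h+1) : Int)) m
      have hc : PySem.Int.mod ((fibPair h m).1 * (2 * (fibPair h m).2 - (fibPair h m).1)) m
          = PySem.Int.mod ((Nat.fib (2*h) : Int)) m := by
        rw [hIH]
        apply pymod_congr hm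
        rw [fib2m h]
        exact ma.mul (((Int.ModEq.refl 2).mul mb).sub ma)
      have hd : PySem.Int.mod ((fibPair h m).1 * (fibPair h m).1 + (fibPair h m).2 * (fibPair h m).2) m
          = PySem.Int.mod ((Nat.fib (2*h+1) : Int)) m := by
        rw [hIH]
        apply pymod_congr hm
        rw [fib2m1 h]
        exact (ma.mul ma).add (mb.mul mb)
      rcases Nat.mod_two_eq_zero_or_one k with hpar | hpar
      · -- k = 2*h
        have hk : k = 2*h := by omega
        simp only [hpar, hc, hd, if_neg (by norm_num : ¬ (0 = 1) )]
        rw [hk]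
      · -- k = 2*h + 1
        have hk : k = 2*h+1 := by omega
        simp only [hpar, hc, hd]
        rw [hk]
        refine Prod.ext rfl ?_
        show PySem.Int.mod (PySem.Int.mod ((Nat.fib (2*h) : Int)) m + PySem.Int.mod ((Nat.fib (2*h+1) : Int)) m) m
            = PySem.Int.mod ((Nat.fib (2*h+1+1) : Int)) m
        apply pymod_congr hm
        have hfib : (Nat.fib (2*h+1+1) : Int) = (Nat.fib (2*h) : Int) + (Nat.fib (2*h+1) : Int) := by
          have := Nat.fib_add_two (n := 2*h)
          zify at this
          rw [show 2*h+1+1 = 2*h+2 by ring, this]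
        rw [hfib]
        exact (pymod_modeq _ m).add (pymod_modeq _ m)

-- A's loop invariant: after the iterations for 2..j+2, the state is (H_{j} % m, H_{j+1} % m).
theorem loopA (m alpha beta : Int) (hm : m ≠ 0) (j : Nat) :
    (PySem.List.pyRange 2 (((j+1 : Nat) : Int) + 1) 1).foldl
      (fun (p : Int × Int) _ => (p.2, PySem.Int.mod (p.2 + p.1) m))
      (PySem.Int.mod alpha m, PySem.Int.mod beta m)
    = (PySem.Int.mod (hor alpha beta j) m, PySem.Int.mod (hor alpha beta (j+1)) m) := by
  induction j with
  | zero =>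
    rw [show (((0+1 : Nat) : Int) + 1) = 2 by norm_num, PySem.List.pyRange_one_eq_nil (by norm_num)]
    simp [hor]
  | succ i ih =>
    have hsplit : PySem.List.pyRange 2 (((i+1+1 : Nat) : Int) + 1) 1
        = PySem.List.pyRange 2 (((i+1 : Nat) : Int) + 1) 1 ++ [((i+1 : Nat) : Int) + 1] := by
      rw [show ((((i+1+1 : Nat)) : Int) + 1) = ((((i+1 : Nat)) : Int) + 1) + 1 by push_cast; ring]
      exact PySem.List.pyRange_one_succ_right (by push_cast; omega)
    rw [hsplit, List.foldl_append, ih]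
    simp only [List.foldl_cons, List.foldl_nil]
    refine Prod.ext rfl ?_
    show PySem.Int.mod (PySem.Int.mod (hor alpha beta (i+1)) m + PySem.Int.mod (hor alpha beta i) m) m
        = PySem.Int.mod (hor alpha beta (i+2)) m
    apply pymod_congr hm
    rw [show hor alpha beta (i+2) = hor alpha beta (i+1) + hor alpha beta i from rfl]
    exact (pymod_modeq _ m).add (pymod_modeq _ m)

-- ===== VERDICT (by name: the statement is the Claim_ definition above) =====
theorem horadam_sequence_spec : Claim_equal_horadam_sequence := by
  intro alpha beta n m _ hm
  unfold Spec_horadam_sequence horadam_sequence horadam_sequence_alt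
  by_cases h0 : n = 0
  · simp [h0]
  · by_cases h1 : n = 1
    · simp [h1]
    · by_cases hlt : n ≤ 1
      · -- n < 0: A's loop range is empty, B takes the n ≤ 1 branch
        simp only [h0, h1, hlt, if_false]
        rw [PySem.List.pyRange_one_eq_nil (by omega)]
        simp
      · -- n ≥ 2
        have hn2 : 2 ≤ n := by omega
        have hlt' : ¬ n ≤ 1 := hlt
        simp only [h0, h1, hlt', if_false]
        obtain ⟨N, hN⟩ : ∃ N : Nat, n = ((N+1+1 : Nat) : Int) := by
          refine ⟨(n-2).toNat, ?_⟩
          push_cast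
          omega
        subst hN
        have hA := loopA m alpha beta hm (N+1)
        rw [show (((N+1+1 : Nat) : Int) + 1) = (((N+1+1 : Nat) : Int) + 1) from rfl] at hA
        rw [show ((((N+1+1 : Nat)) : Int) + 1) = ((((N+1) + 1: Nat)) : Int) + 1 by push_cast; ring]
        rw [hA]
        have hT : (((N+1+1 : Nat) : Int) - 1).toNat = N+1 := by push_cast; omega
        rw [hT, fibPair_eq m hm (N+1)]
        rw [hor_eq_fib alpha beta (N+1)]
        apply pymod_congr hm
        exact ((pymod_modeq _ m).mul (Int.ModEq.refl alpha)).add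
          ((pymod_modeq _ m).mul (Int.ModEq.refl beta)) |>.symm
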